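-- pv_equiv track=rewrite | github.com/intel-ctrlsys/actsys | oobrestserver/oobrestserver/GlobTools.py | regex_from_glob
-- ===== SOURCE A (Python) =====
-- def regex_from_glob(pattern):
--
--     """FSM to convert globstar patterns to Python regexes"""
--
--     state = 'start'
--     result = ''
--     bracket_set = ''
--     bracket_negate = False
--
--     for symbol in pattern:
--         if state == '*':
--             if symbol == '*':
--                 result += '.*'
--                 state = 'start'
--             else:
--                 result += '[^/]*' + symbol
--                 state = 'start'
--         elif state == '[':
--             if symbol == '!':
--                 bracket_negate = True
--             elif symbol == ']':
--                 if bracket_negate: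
--                     result += '[^' + bracket_set + ']'
--                 else:
--                     result += '[' + bracket_set + ']'
--                 state = 'start'
--             else:
--                 bracket_set += symbol
--         else:
--             if symbol == '*':
--                 state = '*'
--             elif symbol == '?':
--                 result += '.'
--             elif symbol == '[':
--                 bracket_negate = False
--                 state = '['
--             else:
--                 result += symbol
--     if state == '*':
--         result += '[^/]*'
--     elif state == '[':
--         message = 'Invalid glob expression: open bracket not closed'
--         raise ValueError(message)
--     result += '$'
--     return result
-- ===== SOURCE B (Python) =====
-- def regex_from_glob(pattern):
--     """Convert globstar patterns to Python regexes (index-driven parser)."""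
--     i = 0
--     n = len(pattern)
--     out = []
--     while i < n:
--         c = pattern[i]
--         i += 1
--         if c == '*':
--             if i < n:
--                 nxt = pattern[i]
--                 i += 1
--                 out.append('.*' if nxt == '*' else '[^/]*' + nxt)
--             else:
--                 out.append('[^/]*')
--         elif c == '?':
--             out.append('.')
--         elif c == '[':
--             chars = []
--             negate = False
--             while True:
--                 if i == n:
--                     raise ValueError('Invalid glob expression: open bracket not closed')
--                 b = pattern[i]
--                 i += 1
--                 if b == '!':
--                     negate = True
--                 elif b == ']':
--                     break
--                 else:
--                     chars.append(b)
--             out.append(('[^' if negate else '[') + ''.join(chars) + ']')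
--         else:
--             out.append(c)
--     out.append('$')
--     return ''.join(out)
-- ===== Notes on version B (the rewrite author's own statement) =====
-- stated objective: alternative
-- what changed: Replaced A's four-variable state-machine loop (state/result/bracket_set/bracket_negate driven one symbol at a time) by a direct index-driven parser: a while loop with one-character lookahead after a star and an inner scanning loop that collects each bracket group's characters locally; Pre_ excludes only the patterns with an unclosed bracket group, on which both A and B raise the same ValueError.
-- intended difference: On patterns where a bracket group with content is followed by another bracket group, A leaks the earlier group's characters into the later group's character class because its bracket_set variable is never reset, while B collects each group's characters locally, which is the intended per-group translation. — e.g. on regex_from_glob("[a][b]"): A returns "[a][ab]$", B returns "[a][b]$"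
import Mathlib
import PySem

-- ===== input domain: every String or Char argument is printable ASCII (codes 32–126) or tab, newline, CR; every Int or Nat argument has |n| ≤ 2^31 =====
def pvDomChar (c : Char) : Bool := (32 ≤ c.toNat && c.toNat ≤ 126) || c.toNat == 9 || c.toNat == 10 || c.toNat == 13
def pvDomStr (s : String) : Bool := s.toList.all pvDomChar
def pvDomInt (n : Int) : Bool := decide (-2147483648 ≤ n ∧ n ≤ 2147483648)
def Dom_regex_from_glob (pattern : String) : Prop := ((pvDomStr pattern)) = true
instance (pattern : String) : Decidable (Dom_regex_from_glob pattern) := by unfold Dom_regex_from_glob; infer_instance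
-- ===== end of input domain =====

-- B replaces A's four-variable FSM by an index-driven lookahead parser with a per-group
-- character set (same cost, different decomposition); on patterns where a non-empty bracket
-- group precedes another group, A leaks the earlier group's characters into the later class
-- (its bracket_set is never reset) while B emits each group's own characters (D_ below);
-- on patterns with an unclosed bracket group BOTH raise the same ValueError (outside Pre_).

-- ===== PORT A =====
inductive GState | start | star | brk
deriving DecidableEq, Repr

-- one step of A's for-loop, acting on the state (state, result, bracket_set, bracket_negate)
def stepA (s : GState × String × String × Bool) (sym : Char) : GState × String × String × Bool :=
  match s with
  | (st, res, bset, bneg) =>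
    match st with
    | .star =>
      if sym = '*' then (.start, res ++ ".*", bset, bneg)
      else (.start, res ++ "[^/]*" ++ String.singleton sym, bset, bneg)
    | .brk =>
      if sym = '!' then (.brk, res, bset, true)
      else if sym = ']' then
        (.start, res ++ (if bneg then "[^" else "[") ++ bset ++ "]", bset, bneg)
      else (.brk, res, bset.push sym, bneg)
    | .start =>
      if sym = '*' then (.star, res, bset, bneg)
      else if sym = '?' then (.start, res ++ ".", bset, bneg)
      else if sym = '[' then (.brk, res, bset, false)
      else (.start, res ++ String.singleton sym, bset, bneg)

-- A's code after the loop ('[' state: Python raises ValueError, excluded by Pre_)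
def finishA (s : GState × String × String × Bool) : String :=
  match s.1 with
  | .star => s.2.1 ++ "[^/]*" ++ "$"
  | .brk => ""
  | .start => s.2.1 ++ "$"

def regex_from_glob (pattern : String) : String :=
  finishA (pattern.toList.foldl stepA (GState.start, "", "", false))

-- ===== PORT B =====
mutual
-- outer while loop of Source B, dispatching on the current character
def altLoop : List Char → String
  | [] => "$"
  | c :: rest =>
    if c = '*' then altStar rest
    else if c = '?' then "." ++ altLoop rest
    else if c = '[' then altBrk "" false rest
    else String.singleton c ++ altLoop rest
  termination_by structural l => l
-- the one-character lookahead after '*'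
def altStar : List Char → String
  | [] => "[^/]*" ++ "$"
  | c :: rest =>
    if c = '*' then ".*" ++ altLoop rest
    else "[^/]*" ++ String.singleton c ++ altLoop rest
  termination_by structural l => l
-- the inner bracket-group loop; acc collects this group's characters
-- ([] = unclosed group: Python raises ValueError, excluded by Pre_)
def altBrk (acc : String) (neg : Bool) : List Char → String
  | [] => ""
  | c :: rest =>
    if c = '!' then altBrk acc true rest
    else if c = ']' then (if neg then "[^" else "[") ++ acc ++ "]" ++ altLoop rest
    else altBrk (acc.push c) neg rest
  termination_by structural l => l
end

def regex_from_glob_alt (pattern : String) : String := altLoop pattern.toList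

-- ===== PRECONDITION & SPEC =====
-- grammar condition (mode: are we inside a bracket group?): every bracket group opened
-- outside a group is closed by a later ']' (the character right after a lone '*' is
-- consumed uninterpreted, so it never opens a group)
def scanOk : Bool → List Char → Bool
  | inBrk, [] => !inBrk
  | true, c :: rest => if c = ']' then scanOk false rest else scanOk true rest
  | false, c :: rest =>
    if c = '*' then (match rest with | [] => true | _ :: r => scanOk false r)
    else if c = '[' then scanOk true rest
    else scanOk false rest
termination_by structural _ l => l

-- Pre_ excludes exactly the patterns with an unclosed bracket group, on which the Python A
-- raises ValueError (and B raises the same ValueError).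
def Pre_regex_from_glob (pattern : String) : Prop := scanOk false pattern.toList = true
instance (pattern : String) : Decidable (Pre_regex_from_glob pattern) := by
  unfold Pre_regex_from_glob; infer_instance

-- D_'s scanner state: 0/1 outside a group (1 = some closed group had content), 2/3 inside a
-- group (3 = this group has content), 4/5 = the char after a '*' (consumed uninterpreted),
-- 6 = a '[' was reached after a contentful group (the difference)
def dstep (s : Nat) (c : Char) : Nat :=
  if 4 ≤ s then (if s = 6 then 6 else s - 4)
  else if 2 ≤ s then (if c = ']' then s - 2 else if c = '!' then s else 3)
  else if c = '*' then s + 4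
  else if c = '[' then (if s = 1 then 6 else 2)
  else s

def pvWitness_regex_from_glob : String := "a*b"

-- On patterns where a bracket group with content is followed by another bracket group, A
-- leaks the earlier group's characters into the later group's character class (its
-- bracket_set is never reset); B translates each group by itself, which is the intended
-- per-group conversion.
def D_regex_from_glob (pattern : String) : Prop := pattern.toList.foldl dstep 0 = 6
instance (pattern : String) : Decidable (D_regex_from_glob pattern) := by
  unfold D_regex_from_glob; infer_instance

def Spec_regex_from_glob (pattern : String) (out : String) : Prop :=
  ¬ D_regex_from_glob pattern → out = regex_from_glob_alt pattern
instance (pattern : String) (out : String) : Decidable (Spec_regex_from_glob pattern out) := by unfold Spec_regex_from_glob; infer_instance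

def pvDiffWitness_regex_from_glob : String := "[a][b]"
def pvDiffWitnessOut_regex_from_glob : String × String := ("[a][ab]$", "[a][b]$")

-- ===== CLAIM (what is proved, stated in full; the proofs are below) =====
def Claim_unchanged_regex_from_glob : Prop := ∀ (pattern : String), Dom_regex_from_glob pattern → Pre_regex_from_glob pattern → Spec_regex_from_glob pattern (regex_from_glob pattern)
def Claim_changed_regex_from_glob : Prop := Dom_regex_from_glob (pvDiffWitness_regex_from_glob) ∧ Pre_regex_from_glob (pvDiffWitness_regex_from_glob) ∧ D_regex_from_glob (pvDiffWitness_regex_from_glob) ∧ regex_from_glob (pvDiffWitness_regex_from_glob) = pvDiffWitnessOut_regex_from_glob.1 ∧ regex_from_glob_alt (pvDiffWitness_regex_from_glob) = pvDiffWitnessOut_regex_from_glob.2 ∧ pvDiffWitnessOut_regex_from_glob.1 ≠ pvDiffWitnessOut_regex_from_glob.2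
def Claim_exact_regex_from_glob : Prop := ∀ (pattern : String), Dom_regex_from_glob pattern → Pre_regex_from_glob pattern → D_regex_from_glob pattern → regex_from_glob pattern ≠ regex_from_glob_alt pattern

-- ===== LEMMAS AND PROOFS =====
theorem push_append (s t : String) (c : Char) : s.push c ++ t = s ++ (String.singleton c ++ t) := by
  apply String.ext
  simp

theorem push_ne_empty (s : String) (c : Char) : ¬ s.push c = "" := by
  intro h
  have hlen : (s.push c).length = s.length + 1 := String.length_push ..
  rw [h] at hlen
  simp at hlen

def starOk : List Char → Bool
  | [] => true
  | _ :: r => scanOk false r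

theorem globOk_cons (c : Char) (rest : List Char) :
    scanOk false (c :: rest) =
      (if c = '*' then starOk rest else if c = '[' then scanOk true rest else scanOk false rest) := by
  cases rest <;> simp [scanOk, starOk]

theorem brkOk_cons (c : Char) (rest : List Char) :
    scanOk true (c :: rest) = (if c = ']' then scanOk false rest else scanOk true rest) := by
  simp [scanOk]

theorem foldl_dstep_six (l : List Char) : l.foldl dstep 6 = 6 := by
  induction l with
  | nil => rfl
  | cons c r ih => simpa [dstep] using ih

-- out/inb/skp: the dstep encoding of A's flag states ('is the carried bracket_set non-empty')
def outS (seen : String) : Nat := if seen = "" then 0 else 1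
def inS (seen : String) : Nat := if seen = "" then 2 else 3
def skpS (seen : String) : Nat := if seen = "" then 4 else 5

theorem dstep_out_star (seen : String) : dstep (outS seen) '*' = skpS seen := by
  unfold outS skpS; split_ifs <;> decide

theorem dstep_out_plain (seen : String) (c : Char) (h1 : c ≠ '*') (h3 : c ≠ '[') :
    dstep (outS seen) c = outS seen := by
  unfold outS; split_ifs <;> simp [dstep, h1, h3]

theorem dstep_skp (seen : String) (c : Char) : dstep (skpS seen) c = outS seen := by
  unfold outS skpS; split_ifs <;> simp [dstep]

theorem dstep_in_bang (seen : String) : dstep (inS seen) '!' = inS seen := by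
  unfold inS; split_ifs <;> decide

theorem dstep_in_close (seen : String) : dstep (inS seen) ']' = outS seen := by
  unfold inS outS; split_ifs <;> decide

theorem dstep_in_plain (seen : String) (c : Char) (h1 : c ≠ '!') (h2 : c ≠ ']') :
    dstep (inS seen) c = inS (seen.push c) := by
  unfold inS
  rw [if_neg (push_ne_empty seen c)]
  split_ifs <;> simp [dstep, h1, h2]

theorem key : ∀ (n : Nat) (l : List Char), l.length ≤ n → ∀ (res seen : String) (ng : Bool),
    (scanOk false l = true → l.foldl dstep (outS seen) ≠ 6 →
      finishA (l.foldl stepA (GState.start, res, seen, ng)) = res ++ altLoop l)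
    ∧ (starOk l = true → l.foldl dstep (skpS seen) ≠ 6 →
      finishA (l.foldl stepA (GState.star, res, seen, ng)) = res ++ altStar l)
    ∧ (∀ neg, scanOk true l = true → l.foldl dstep (inS seen) ≠ 6 →
      finishA (l.foldl stepA (GState.brk, res, seen, neg)) = res ++ altBrk seen neg l) := by
  intro n
  induction n with
  | zero =>
    intro l hl res seen ng
    have : l = [] := List.eq_nil_of_length_eq_zero (Nat.le_zero.mp hl)
    subst this
    refine ⟨fun _ _ => ?_, fun _ _ => ?_, fun neg h _ => ?_⟩
    · simp [finishA, altLoop]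
    · simp [finishA, altStar, String.append_assoc]
    · simp [scanOk] at h
  | succ m ih =>
    intro l hl res seen ng
    cases l with
    | nil =>
      refine ⟨fun _ _ => ?_, fun _ _ => ?_, fun neg h _ => ?_⟩
      · simp [finishA, altLoop]
      · simp [finishA, altStar, String.append_assoc]
      · simp [scanOk] at h
    | cons c rest =>
      have hr : rest.length ≤ m := by simpa using Nat.lt_succ_iff.mp (Nat.lt_of_lt_of_le (by simp) hl)
      refine ⟨fun h hd => ?_, fun h hd => ?_, fun neg h hd => ?_⟩
      · -- start state
        rw [globOk_cons] at h
        rw [List.foldl_cons] at hd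
        by_cases h1 : c = '*'
        · subst h1
          simp only [if_pos rfl] at h
          rw [dstep_out_star] at hd
          simpa [stepA, altLoop] using (ih rest hr res seen ng).2.1 h hd
        · by_cases h3 : c = '['
          · subst h3
            simp only [show ('[' : Char) ≠ '*' from by decide, if_false, if_pos rfl] at h
            have hs : seen = "" := by
              by_contra hne
              have : dstep (outS seen) '[' = 6 := by unfold outS; rw [if_neg hne]; decide
              rw [this, foldl_dstep_six] at hd
              exact hd rfl
            subst hs
            have : dstep (outS "") '[' = inS "" := by decide
            rw [this] at hd
            simpa [stepA, altLoop] using (ih rest hr res "" false).2.2 false h hd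
          · simp only [if_neg h1, if_neg h3] at h
            rw [dstep_out_plain seen c h1 h3] at hd
            by_cases h2 : c = '?'
            · subst h2
              simpa [stepA, altLoop, String.append_assoc] using (ih rest hr (res ++ ".") seen ng).1 h hd
            · simpa [stepA, altLoop, h1, h2, h3, String.append_assoc, push_append]
                using (ih rest hr (res ++ String.singleton c) seen ng).1 h hd
      · -- star state (the char after '*', consumed uninterpreted)
        have h' : scanOk false rest = true := by cases rest <;> simpa [starOk] using h
        rw [List.foldl_cons, dstep_skp] at hd
        by_cases h1 : c = '*'
        · subst h1
          simpa [stepA, altStar, String.append_assoc] using (ih rest hr (res ++ ".*") seen ng).1 h' hd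
        · simpa [stepA, altStar, h1, String.append_assoc, push_append]
            using (ih rest hr (res ++ "[^/]*" ++ String.singleton c) seen ng).1 h' hd
      · -- bracket state
        rw [brkOk_cons] at h
        rw [List.foldl_cons] at hd
        by_cases h1 : c = '!'
        · subst h1
          rw [dstep_in_bang] at hd
          simp only [show ('!' : Char) ≠ ']' from by decide, if_false] at h
          simpa [stepA, altBrk] using (ih rest hr res seen ng).2.2 true h hd
        · by_cases h2 : c = ']'
          · subst h2
            rw [dstep_in_close] at hd
            simp only [if_pos rfl] at h
            simpa [stepA, altBrk, h1, String.append_assoc]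
              using (ih rest hr (res ++ (if neg then "[^" else "[") ++ seen ++ "]") seen neg).1 h hd
          · simp only [if_neg h2] at h
            rw [dstep_in_plain seen c h1 h2] at hd
            simpa [stepA, altBrk, h1, h2] using (ih rest hr res (seen.push c) ng).2.2 neg h hd

-- ===== VERDICT (by name: the statement is the Claim_ definition above) =====
theorem regex_from_glob_spec : Claim_unchanged_regex_from_glob := by
  intro pattern _ hpre hnd
  unfold regex_from_glob regex_from_glob_alt
  have hd : pattern.toList.foldl dstep (outS "") ≠ 6 := by
    simpa [outS, D_regex_from_glob] using hnd
  have := (key pattern.toList.length pattern.toList le_rfl "" "" false).1 hpre hd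
  simpa using this

theorem regex_from_glob_changed : Claim_changed_regex_from_glob := by
  unfold Claim_changed_regex_from_glob; decide

-- length comparison: inside D_ A's output is strictly longer than B's (the leaked characters)
theorem keyLen : ∀ (n : Nat) (l : List Char), l.length ≤ n → ∀ (res seen : String) (ng : Bool),
    (scanOk false l = true →
      (res ++ altLoop l).length ≤ (finishA (l.foldl stepA (GState.start, res, seen, ng))).length
      ∧ (l.foldl dstep (outS seen) = 6 →
        (res ++ altLoop l).length < (finishA (l.foldl stepA (GState.start, res, seen, ng))).length))
    ∧ (starOk l = true →
      (res ++ altStar l).length ≤ (finishA (l.foldl stepA (GState.star, res, seen, ng))).length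
      ∧ (l.foldl dstep (skpS seen) = 6 →
        (res ++ altStar l).length < (finishA (l.foldl stepA (GState.star, res, seen, ng))).length))
    ∧ (∀ (neg : Bool) (acc : String), acc.length ≤ seen.length → scanOk true l = true →
      (res ++ altBrk acc neg l).length ≤ (finishA (l.foldl stepA (GState.brk, res, seen, neg))).length
      ∧ ((l.foldl dstep (inS seen) = 6 ∨ acc.length < seen.length) →
        (res ++ altBrk acc neg l).length < (finishA (l.foldl stepA (GState.brk, res, seen, neg))).length)) := by
  intro n
  induction n with
  | zero =>
    intro l hl res seen ng
    have : l = [] := List.eq_nil_of_length_eq_zero (Nat.le_zero.mp hl)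
    subst this
    refine ⟨fun _ => ⟨?_, fun h6 => ?_⟩, fun _ => ⟨?_, fun h6 => ?_⟩, fun neg acc _ h => ?_⟩
    · simp [finishA, altLoop]
    · unfold outS at h6; split_ifs at h6 <;> simp at h6
    · simp [finishA, altStar, String.append_assoc]
    · unfold skpS at h6; split_ifs at h6 <;> simp at h6
    · simp [scanOk] at h
  | succ m ih =>
    intro l hl res seen ng
    cases l with
    | nil =>
      refine ⟨fun _ => ⟨?_, fun h6 => ?_⟩, fun _ => ⟨?_, fun h6 => ?_⟩, fun neg acc _ h => ?_⟩
      · simp [finishA, altLoop]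
      · unfold outS at h6; split_ifs at h6 <;> simp at h6
      · simp [finishA, altStar, String.append_assoc]
      · unfold skpS at h6; split_ifs at h6 <;> simp at h6
      · simp [scanOk] at h
    | cons c rest =>
      have hr : rest.length ≤ m := by simpa using Nat.lt_succ_iff.mp (Nat.lt_of_lt_of_le (by simp) hl)
      refine ⟨fun h => ?_, fun h => ?_, fun neg acc hacc h => ?_⟩
      · -- start state
        rw [globOk_cons] at h
        by_cases h1 : c = '*'
        · subst h1
          simp only [if_pos rfl] at h
          have := (ih rest hr res seen ng).2.1 h
          constructor
          · simpa [stepA, altLoop] using this.1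
          · intro h6
            rw [List.foldl_cons, dstep_out_star] at h6
            simpa [stepA, altLoop] using this.2 h6
        · by_cases h3 : c = '['
          · subst h3
            simp only [show ('[' : Char) ≠ '*' from by decide, if_false, if_pos rfl] at h
            have hb := (ih rest hr res seen ng).2.2 false "" (by simp) h
            constructor
            · simpa [stepA, altLoop] using hb.1
            · intro h6
              rw [List.foldl_cons] at h6
              by_cases hs : seen = ""
              · subst hs
                have hst : dstep (outS "") '[' = inS "" := by decide
                rw [hst] at h6
                simpa [stepA, altLoop] using hb.2 (Or.inl h6)
              · have hpos : 0 < seen.length := by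
                  rcases Nat.eq_zero_or_pos seen.length with h0 | h0
                  · exact absurd (String.length_eq_zero_iff.mp h0) hs
                  · exact h0
                simpa [stepA, altLoop] using hb.2 (Or.inr (by simpa using hpos))
          · simp only [if_neg h1, if_neg h3] at h
            by_cases h2 : c = '?'
            · subst h2
              have := (ih rest hr (res ++ ".") seen ng).1 h
              constructor
              · simpa [stepA, altLoop, String.append_assoc] using this.1
              · intro h6
                rw [List.foldl_cons, dstep_out_plain seen _ (by decide) (by decide)] at h6
                simpa [stepA, altLoop, String.append_assoc] using this.2 h6
            · have := (ih rest hr (res ++ String.singleton c) seen ng).1 h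
              constructor
              · simpa [stepA, altLoop, h1, h2, h3, String.append_assoc, push_append] using this.1
              · intro h6
                rw [List.foldl_cons, dstep_out_plain seen c h1 h3] at h6
                simpa [stepA, altLoop, h1, h2, h3, String.append_assoc, push_append] using this.2 h6
      · -- star state
        have h' : scanOk false rest = true := by cases rest <;> simpa [starOk] using h
        by_cases h1 : c = '*'
        · subst h1
          have := (ih rest hr (res ++ ".*") seen ng).1 h'
          constructor
          · simpa [stepA, altStar, String.append_assoc] using this.1
          · intro h6
            rw [List.foldl_cons, dstep_skp] at h6
            simpa [stepA, altStar, String.append_assoc] using this.2 h6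
        · have := (ih rest hr (res ++ "[^/]*" ++ String.singleton c) seen ng).1 h'
          constructor
          · simpa [stepA, altStar, h1, String.append_assoc, push_append] using this.1
          · intro h6
            rw [List.foldl_cons, dstep_skp] at h6
            simpa [stepA, altStar, h1, String.append_assoc, push_append] using this.2 h6
      · -- bracket state
        rw [brkOk_cons] at h
        by_cases h1 : c = '!'
        · subst h1
          simp only [show ('!' : Char) ≠ ']' from by decide, if_false] at h
          have hb := (ih rest hr res seen ng).2.2 true acc hacc h
          constructor
          · simpa [stepA, altBrk] using hb.1
          · intro h6
            have h6' : rest.foldl dstep (inS seen) = 6 ∨ acc.length < seen.length := by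
              rcases h6 with h6 | h6
              · rw [List.foldl_cons, dstep_in_bang] at h6; exact Or.inl h6
              · exact Or.inr h6
            simpa [stepA, altBrk] using hb.2 h6' 
        · by_cases h2 : c = ']'
          · subst h2
            simp only [if_pos rfl] at h
            have hA := (ih rest hr (res ++ (if neg then "[^" else "[") ++ seen ++ "]") seen neg).1 h
            have e1 : (res ++ altBrk acc neg (']' :: rest)).length =
                res.length + (if neg then "[^" else "[" : String).length + acc.length
                  + ("]" : String).length + (altLoop rest).length := by
              simp [altBrk, h1, String.length_append]
              omega
            have e2 : finishA ((']' :: rest).foldl stepA (GState.brk, res, seen, neg)) =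
                finishA (rest.foldl stepA
                  (GState.start, res ++ (if neg then "[^" else "[") ++ seen ++ "]", seen, neg)) := by
              simp [stepA, h1]
            rw [e2]
            constructor
            · have h1' := hA.1
              simp only [String.length_append] at h1'
              omega
            · intro h6
              rcases h6 with h6 | h6
              · rw [List.foldl_cons, dstep_in_close] at h6
                have h2' := hA.2 h6
                simp only [String.length_append] at h2'
                omega
              · have h1' := hA.1
                simp only [String.length_append] at h1'
                omega
          · simp only [if_neg h2] at h
            have hb := (ih rest hr res (seen.push c) ng).2.2 neg (acc.push c)
              (by simp [String.length_push]; omega) h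
            constructor
            · simpa [stepA, altBrk, h1, h2] using hb.1
            · intro h6
              have h6' : rest.foldl dstep (inS (seen.push c)) = 6
                  ∨ (acc.push c).length < (seen.push c).length := by
                rcases h6 with h6 | h6
                · rw [List.foldl_cons, dstep_in_plain seen c h1 h2] at h6; exact Or.inl h6
                · exact Or.inr (by simp [String.length_push]; omega)
              simpa [stepA, altBrk, h1, h2] using hb.2 h6' 

theorem regex_from_glob_tight : Claim_exact_regex_from_glob := by
  intro pattern _ hpre hd heq
  have h6 : pattern.toList.foldl dstep (outS "") = 6 := by
    simpa [outS, D_regex_from_glob] using hd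
  have := ((keyLen pattern.toList.length pattern.toList le_rfl "" "" false).1 hpre).2 h6
  rw [show finishA (pattern.toList.foldl stepA (GState.start, "", "", false)) = regex_from_glob pattern from rfl] at this
  rw [heq] at this
  simp [regex_from_glob_alt] at this
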